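-- pv_equiv track=rewrite | github.com/bruceamiller/Bulk-Coding-Store | Personal Projects/Other/Daily Planning Hub/Useful_Funcs.py | textAfterFirstColon
-- ===== SOURCE A (Python) =====
-- def textAfterFirstColon(line):
--     resultText = ""
--     readText = False
--     for i in line:
--         if readText:
--             resultText += i
--         elif i == ":":
--             readText = True
--     return resultText.strip()
-- ===== SOURCE B (Python) =====
-- def textAfterFirstColon(line):
--     i = line.find(":")
--     if i == -1:
--         return ""
--     return line[i + 1:].strip()
-- ===== Notes on version B (the rewrite author's own statement) =====
-- stated objective: simpler
-- what changed: Replaces the character-by-character flag-and-accumulate loop with a single find of the first colon plus a tail slice, then strip; no explicit Python-level loop remains.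
import Mathlib
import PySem

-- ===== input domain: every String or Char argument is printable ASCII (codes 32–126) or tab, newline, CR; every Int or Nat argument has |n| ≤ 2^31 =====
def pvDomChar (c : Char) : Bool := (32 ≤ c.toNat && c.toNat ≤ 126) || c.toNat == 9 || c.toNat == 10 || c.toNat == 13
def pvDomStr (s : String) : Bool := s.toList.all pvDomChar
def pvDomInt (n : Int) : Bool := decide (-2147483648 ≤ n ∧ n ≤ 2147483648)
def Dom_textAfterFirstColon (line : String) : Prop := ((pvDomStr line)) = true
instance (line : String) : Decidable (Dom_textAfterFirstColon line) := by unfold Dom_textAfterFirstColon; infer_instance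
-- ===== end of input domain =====

-- B replaces A's flag-and-accumulate character loop by find-the-colon + slice + strip (simpler, no explicit loop).

-- ===== PORT A =====
-- A's loop state: (resultText, readText); resultText += i appends one char.
def textAfterFirstColon (line : String) : String :=
  let st := line.toList.foldl
    (fun (s : List Char × Bool) i =>
      if s.2 then (s.1 ++ [i], s.2)
      else if i = ':' then (s.1, true) else s)
    ([], false)
  PySem.Str.strip (String.ofList st.1)

-- ===== PORT B =====
def textAfterFirstColon_alt (line : String) : String :=
  let i := PySem.Str.find line ":"
  if i = -1 then "" else PySem.Str.strip (PySem.Str.slice line (some (i + 1)) none)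

-- ===== PRECONDITION & SPEC =====
def Spec_textAfterFirstColon (line : String) (out : String) : Prop := out = textAfterFirstColon_alt line
instance (line : String) (out : String) : Decidable (Spec_textAfterFirstColon line out) := by unfold Spec_textAfterFirstColon; infer_instance

-- ===== CLAIM (what is proved, stated in full; the proofs are below) =====
def Claim_equal_textAfterFirstColon : Prop := ∀ (line : String), Dom_textAfterFirstColon line → Spec_textAfterFirstColon line (textAfterFirstColon line)

-- ===== LEMMAS AND PROOFS =====

-- the characters after the first ':' (empty if there is none)
def afterColon : List Char → List Char
  | [] => []
  | c :: cs => if c = ':' then cs else afterColon cs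

theorem foldA_true (l acc : List Char) :
    l.foldl (fun (s : List Char × Bool) i =>
      if s.2 then (s.1 ++ [i], s.2) else if i = ':' then (s.1, true) else s) (acc, true)
    = (acc ++ l, true) := by
  induction l generalizing acc with
  | nil => simp
  | cons c cs ih => simp [List.foldl, ih]

theorem foldA_false (l acc : List Char) :
    l.foldl (fun (s : List Char × Bool) i =>
      if s.2 then (s.1 ++ [i], s.2) else if i = ':' then (s.1, true) else s) (acc, false)
    = if ':' ∈ l then (acc ++ afterColon l, true) else (acc, false) := by
  induction l with
  | nil => simp
  | cons c cs ih =>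
    by_cases hc : c = ':'
    · subst hc; simp [List.foldl, foldA_true, afterColon]
    · simp [List.foldl, hc, ih, afterColon, Ne.symm hc]

theorem singleton_infix_iff (a : Char) (l : List Char) : [a] <:+: l ↔ a ∈ l := by
  constructor
  · intro h; exact h.sublist.subset (by simp)
  · intro h
    obtain ⟨s, t, rfl⟩ := List.append_of_mem h
    exact ⟨s, t, by simp⟩

theorem drop_succ_eq_afterColon (l : List Char) (n : Nat)
    (h1 : [':'] <+: l.drop n) (h2 : ∀ i < n, ¬ [':'] <+: l.drop i) :
    l.drop (n + 1) = afterColon l := by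
  induction l generalizing n with
  | nil => simp at h1
  | cons c cs ih =>
    cases n with
    | zero =>
      rw [List.drop_zero] at h1
      rcases h1 with ⟨t, ht⟩
      injection ht with hc hcs
      subst hc
      simp [afterColon]
    | succ m =>
      have hc : c ≠ ':' := by
        intro hc; subst hc
        exact h2 0 (by omega) ⟨cs, rfl⟩
      rw [show (c :: cs).drop (m + 1 + 1) = cs.drop (m + 1) from rfl]
      rw [afterColon, if_neg hc]
      exact ih m (by simpa using h1) (fun i hi => by simpa using h2 (i + 1) (by omega))

theorem strip_congr {s t : String} (h : s.toList = t.toList) :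
    PySem.Str.strip s = PySem.Str.strip t := by
  rw [String.toList_inj.mp h]

-- ===== VERDICT (by name: the statement is the Claim_ definition above) =====
theorem textAfterFirstColon_spec : Claim_equal_textAfterFirstColon := by
  intro line _
  unfold Spec_textAfterFirstColon textAfterFirstColon textAfterFirstColon_alt
  simp only [PySem.Str.find_eq]
  set l := line.toList with hl
  rw [foldA_false]
  by_cases hmem : ':' ∈ l
  · have hinf : [':'] <:+: l := (singleton_infix_iff ':' l).mpr hmem
    have hne : PySem.Chars.find l (":".toList) ≠ -1 := by
      simpa using (PySem.Chars.find_ne_neg_one_iff (s := l) (sub := [':'])).mpr hinf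
    have hnn : 0 ≤ PySem.Chars.find l (":".toList) := by
      simpa using (PySem.Chars.find_nonneg_iff (s := l) (sub := [':'])).mpr hinf
    rw [if_pos hmem, if_neg hne]
    obtain ⟨hpre, hmin⟩ := PySem.Chars.find_spec (s := l) (sub := (":".toList)) (by simpa using hnn)
    apply strip_congr
    have hslice : (PySem.Str.slice line (some (PySem.Chars.find l (":".toList) + 1)) none).toList
        = l.drop (PySem.Chars.find l (":".toList) + 1).toNat := by
      rw [PySem.Str.toList_slice, ← hl, PySem.Chars.slice_eq_listSlice,
        PySem.List.slice_from _ (by omega)]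
    rw [hslice]
    have : (PySem.Chars.find l (":".toList) + 1).toNat
        = (PySem.Chars.find l (":".toList)).toNat + 1 := by omega
    rw [this]
    rw [drop_succ_eq_afterColon l _ hpre (fun i hi => hmin i hi)]
    simp [String.toList_ofList]
  · have hninf : ¬ [':'] <:+: l := fun h => hmem ((singleton_infix_iff ':' l).mp h)
    have heq : PySem.Chars.find l (":".toList) = -1 := by
      simpa using (PySem.Chars.find_eq_neg_one_iff (s := l) (sub := [':'])).mpr hninf
    rw [if_neg hmem, if_pos heq]
    have h0 : String.ofList (([], false) : List Char × Bool).1 = "" := rfl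
    rw [h0]
    decide
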